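-- pv_equiv track=rewrite | github.com/israelchadad/train_py | Train.py | weight_of_word
-- ===== SOURCE A (Python) =====
-- def weight_of_word(string):
--     weightArr = []
--     stringArr = string.split(' ')
--     for word in stringArr:
--         tempS = 0
--         for ch in word:
--             tempS += ord(ch) - 96
--         weightArr.append(tempS)
--
--     maxW = max(weightArr)
--     return stringArr[weightArr.index(maxW)]
-- ===== SOURCE B (Python) =====
-- def weight_of_word(string):
--     best = None
--     best_w = None
--     for word in string.split(' '):
--         w = sum(ord(ch) - 96 for ch in word)
--         if best_w is None or w > best_w:
--             best, best_w = word, w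
--     return best
-- ===== Notes on version B (the rewrite author's own statement) =====
-- stated objective: simpler
-- what changed: Replaces the parallel weight list plus separate max() and .index() scans with a single pass that keeps the current best word and its weight, updating only on strictly greater weight so the first maximum wins.
import Mathlib
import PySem

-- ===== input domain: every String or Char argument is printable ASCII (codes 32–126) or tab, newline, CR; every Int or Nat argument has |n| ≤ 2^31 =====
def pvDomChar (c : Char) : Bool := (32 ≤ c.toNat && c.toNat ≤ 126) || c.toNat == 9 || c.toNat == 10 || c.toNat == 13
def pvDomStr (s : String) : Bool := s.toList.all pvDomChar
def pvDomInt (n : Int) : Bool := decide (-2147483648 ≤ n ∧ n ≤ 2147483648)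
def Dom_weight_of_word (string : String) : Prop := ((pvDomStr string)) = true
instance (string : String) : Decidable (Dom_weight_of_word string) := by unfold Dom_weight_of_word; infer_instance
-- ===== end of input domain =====

-- B replaces the weight list + separate max()/.index() scans by one pass keeping the first strictly-best word (simpler).


-- ===== PORT A =====
def weight_of_word (string : String) : String :=
  let stringArr := (PySem.Str.split? string " ").getD []
  let weightArr := stringArr.foldl
    (fun acc word => acc ++ [word.toList.foldl (fun tempS ch => tempS + ((ch.toNat : Int) - 96)) 0]) []
  match PySem.List.max? weightArr (fun x => x) with
  | none => ""   -- unreachable: split always yields a nonempty list, so max() never raises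
  | some maxW =>
    match PySem.List.index? weightArr maxW with
    | none => ""  -- unreachable: maxW is a member of weightArr
    | some i => (PySem.List.pyGet? stringArr ((i : Nat) : Int)).getD ""

-- ===== PORT B =====
def pvStep : Option (String × Int) → String → Option (String × Int) := fun best word =>
  let w := (word.toList.map (fun ch => (ch.toNat : Int) - 96)).sum
  match best with
  | none => some (word, w)
  | some (bw, bv) => if bv < w then some (word, w) else some (bw, bv)

def weight_of_word_alt (string : String) : String :=
  match ((PySem.Str.split? string " ").getD []).foldl pvStep none with
  | none => ""
  | some (bw, _) => bw

-- ===== PRECONDITION & SPEC =====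
def Spec_weight_of_word (string : String) (out : String) : Prop := out = weight_of_word_alt string
instance (string : String) (out : String) : Decidable (Spec_weight_of_word string out) := by unfold Spec_weight_of_word; infer_instance

-- ===== CLAIM (what is proved, stated in full; the proofs are below) =====
def Claim_equal_weight_of_word : Prop := ∀ (string : String), Dom_weight_of_word string → Spec_weight_of_word string (weight_of_word string)

-- ===== LEMMAS AND PROOFS =====

-- the weight of a word, as B computes it
def pvWt (w : String) : Int := (w.toList.map (fun ch => (ch.toNat : Int) - 96)).sum

-- the running-best selection B performs after the first word
def pvG (b : String) (t : List String) : String :=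
  t.foldl (fun acc x => if pvWt acc < pvWt x then x else acc) b

theorem pv_inner_fold (l : List Char) (s : Int) :
    l.foldl (fun tempS ch => tempS + ((ch.toNat : Int) - 96)) s
      = s + (l.map (fun ch => (ch.toNat : Int) - 96)).sum := by
  induction l generalizing s with
  | nil => simp
  | cons c t ih => simp [List.foldl_cons, ih]; ring

theorem pv_weightArr (ws : List String) (acc : List Int) :
    ws.foldl (fun acc word => acc ++ [word.toList.foldl (fun tempS ch => tempS + ((ch.toNat : Int) - 96)) 0]) acc
      = acc ++ ws.map pvWt := by
  induction ws generalizing acc with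
  | nil => simp
  | cons w t ih => rw [List.foldl_cons, ih]; simp [pv_inner_fold, pvWt]

-- B's fold after the first word carries (best word, its weight)
theorem pvStep_some (b x : String) (v : Int) :
    pvStep (some (b, v)) x = if v < pvWt x then some (x, pvWt x) else some (b, v) := rfl

theorem pv_bfold (t : List String) (b : String) :
    t.foldl pvStep (some (b, pvWt b)) = some (pvG b t, pvWt (pvG b t)) := by
  induction t generalizing b with
  | nil => rfl
  | cons x t ih =>
    rw [List.foldl_cons, pvStep_some]
    by_cases h : pvWt b < pvWt x
    · rw [if_pos h, ih x]
      simp [pvG, List.foldl_cons, h]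
    · rw [if_neg h, ih b]
      simp [pvG, List.foldl_cons, h]

-- A's index-then-get gadget returns the first word with the given weight
theorem pv_index_get (ws : List String) (M : Int) :
    (match PySem.List.index? (ws.map pvWt) M with
     | none => ""
     | some i => (PySem.List.pyGet? ws ((i : Nat) : Int)).getD "")
      = (ws.find? (fun x => pvWt x == M)).getD "" := by
  induction ws with
  | nil => simp [PySem.List.index?]
  | cons w t ih =>
    rw [List.map_cons]
    by_cases h : pvWt w = M
    · rw [h, PySem.List.index?_cons_self]
      simp [h]
    · rw [PySem.List.index?_cons_of_ne _ (show pvWt w ≠ M from h)]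
      rcases hi : PySem.List.index? (t.map pvWt) M with _ | i
      · rw [hi] at ih
        simpa [List.find?_cons, h] using ih
      · rw [hi] at ih
        simp only [PySem.List.pyGet?_natCast] at ih ⊢
        simpa [List.find?_cons, h, List.getElem?_cons_succ] using ih

-- all weights bounded by the best: the running best never moves
theorem pv_g_stay (t : List String) (b : String) (h : ∀ y ∈ t, pvWt y ≤ pvWt b) :
    pvG b t = b := by
  induction t with
  | nil => rfl
  | cons x t ih =>
    have hx : ¬ pvWt b < pvWt x := not_lt.mpr (h x List.mem_cons_self)
    simpa [pvG, List.foldl_cons, hx] using ih (fun y hy => h y (List.mem_cons_of_mem _ hy))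

-- the first word attaining the maximum weight is B's running best
theorem pv_find_g (t : List String) (b : String) :
    ((b :: t).find? (fun x => pvWt x == ((t.map pvWt).foldl max (pvWt b)))).getD ""
      = pvG b t := by
  induction t generalizing b with
  | nil => simp [pvG]
  | cons x t ih =>
    by_cases h : pvWt b < pvWt x
    · have hM : ((x :: t).map pvWt).foldl max (pvWt b)
          = (t.map pvWt).foldl max (pvWt x) := by
        simp [List.foldl_cons, max_eq_right (le_of_lt h)]
      rw [hM]
      have h1 := (PySem.List.le_foldl_max (t.map pvWt) (pvWt x)).1
      rw [List.find?_cons_of_neg (by simp only [beq_iff_eq]; omega)]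
      rw [ih x]
      simp [pvG, List.foldl_cons, h]
    · have hM : ((x :: t).map pvWt).foldl max (pvWt b)
          = (t.map pvWt).foldl max (pvWt b) := by
        simp [List.foldl_cons, max_eq_left (not_lt.mp h)]
      rw [hM]
      by_cases he : pvWt b = (t.map pvWt).foldl max (pvWt b)
      · have hall : ∀ y ∈ t, pvWt y ≤ pvWt b := by
          intro y hy
          have := (PySem.List.le_foldl_max (t.map pvWt) (pvWt b)).2 (pvWt y)
            (List.mem_map.mpr ⟨y, hy, rfl⟩)
          omega
        rw [List.find?_cons_of_pos (by simp only [beq_iff_eq]; exact he)]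
        have hstay : pvG b (x :: t) = b := pv_g_stay (x :: t) b (by
          intro y hy
          rcases List.mem_cons.mp hy with rfl | hy
          · exact not_lt.mp h
          · exact hall y hy)
        simp [hstay]
      · have h1 := (PySem.List.le_foldl_max (t.map pvWt) (pvWt b)).1
        have h2 := not_lt.mp h
        rw [List.find?_cons_of_neg (by simp only [beq_iff_eq]; exact he)]
        rw [List.find?_cons_of_neg (by simp only [beq_iff_eq]; omega)]
        have ihb := ih b
        rw [List.find?_cons_of_neg (by simp only [beq_iff_eq]; exact he)] at ihb
        rw [ihb]
        simp [pvG, List.foldl_cons, h]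

-- the whole A pipeline equals the whole B pipeline, for any word list
theorem pv_main (ws : List String) :
    (match PySem.List.max?
        (ws.foldl (fun acc word => acc ++ [word.toList.foldl (fun tempS ch => tempS + ((ch.toNat : Int) - 96)) 0]) [])
        (fun x => x) with
     | none => ""
     | some maxW =>
       match PySem.List.index?
          (ws.foldl (fun acc word => acc ++ [word.toList.foldl (fun tempS ch => tempS + ((ch.toNat : Int) - 96)) 0]) [])
          maxW with
       | none => ""
       | some i => (PySem.List.pyGet? ws ((i : Nat) : Int)).getD "")
    = (match ws.foldl pvStep none with
       | none => ""
       | some (bw, _) => bw) := by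
  rw [pv_weightArr]
  cases ws with
  | nil => rfl
  | cons b t =>
    rw [List.nil_append, List.map_cons, PySem.List.max?_id_cons]
    have hA := pv_index_get (b :: t) ((t.map pvWt).foldl max (pvWt b))
    rw [List.map_cons] at hA
    show (match PySem.List.index? (pvWt b :: List.map pvWt t) (List.foldl max (pvWt b) (List.map pvWt t)) with
      | none => ""
      | some i => (PySem.List.pyGet? (b :: t) ((i : Nat) : Int)).getD "")
      = match List.foldl pvStep none (b :: t) with
        | none => ""
        | some (bw, _) => bw
    rw [hA, pv_find_g]
    rw [List.foldl_cons,
      show pvStep none b = some (b, pvWt b) from rfl,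
      pv_bfold]

-- ===== VERDICT (by name: the statement is the Claim_ definition above) =====
theorem weight_of_word_spec : Claim_equal_weight_of_word := by
  intro string _
  show weight_of_word string = weight_of_word_alt string
  exact pv_main ((PySem.Str.split? string " ").getD [])
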